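-- pv_equiv track=rewrite | github.com/mramagu/Fortran-to-Python-Wrapper | fparser/fparsertools.py | identify_comment
-- ===== SOURCE A (Python) =====
-- def identify_comment(code_line):
--     """
--         Finds the comment in a fortran line of code.
--
--         Args:
--             code_line (string): Line in which the variable is defined.
--
--         Returns:
--             string of the comment incluiding the initial ! or None.
--     """
--     discard_between = ['\'', '\"']
--     counter = 0
--     while counter + 1 <= len(code_line): # Studies each position in the line
--         if code_line[counter] in discard_between: # If fortran character is being written jumps to end of char
--             jump = code_line[counter+1:].find(code_line[counter])
--             if jump == -1:
--                 raise Exception('Fortran character did not finish being declared from position {}: \n {}'.format(counter, code_line))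
--             counter += jump + 1
--         if code_line[counter] == '!': # If it finds comment declaration it stores it
--             return code_line[counter:]
--             break
--         counter += 1 # Advances counter
--     else: # If it reaches the end of the code without finding comment it returns none
--         return None
-- ===== SOURCE B (Python) =====
-- def identify_comment(code_line):
--     """Single-pass state machine: track the active quote char instead of jumping with find."""
--     quote = None
--     quote_start = 0
--     for i, ch in enumerate(code_line):
--         if quote is None:
--             if ch == '\'' or ch == '"':
--                 quote = ch
--                 quote_start = i
--             elif ch == '!':
--                 return code_line[i:]
--         elif ch == quote:
--             quote = None
--     if quote is not None:
--         raise Exception('Fortran character did not finish being declared from position {}: \n {}'.format(quote_start, code_line))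
--     return None
-- ===== Notes on version B (the rewrite author's own statement) =====
-- stated objective: idiomatic
-- what changed: Replaced the while-loop that jumps over quoted sections with str.find by a single forward pass maintaining the active quote character as state.
import Mathlib
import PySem

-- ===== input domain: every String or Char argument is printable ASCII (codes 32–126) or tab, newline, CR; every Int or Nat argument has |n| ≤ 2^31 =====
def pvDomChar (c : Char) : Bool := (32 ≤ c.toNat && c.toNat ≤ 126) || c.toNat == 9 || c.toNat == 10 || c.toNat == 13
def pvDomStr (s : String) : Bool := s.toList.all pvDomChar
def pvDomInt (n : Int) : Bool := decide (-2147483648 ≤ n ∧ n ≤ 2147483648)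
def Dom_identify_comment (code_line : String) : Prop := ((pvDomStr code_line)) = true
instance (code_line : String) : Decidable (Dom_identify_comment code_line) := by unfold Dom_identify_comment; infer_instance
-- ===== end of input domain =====

-- B replaces A's find-and-jump quote skipping by a single-pass state machine over the characters (idiomatic rewrite, same cost).


-- ===== PORT A =====
-- A's while loop: counter scans the list; at a quote, `find` on the rest gives the jump.
-- On the `raise Exception` path (no closing quote found) the Python raises; that input is
-- outside Pre_, and the port returns `none` there (arbitrary value, never claimed).
def goA (s : List Char) (counter : Nat) : Option String :=
  if h : counter + 1 ≤ s.length then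
    let c := s[counter]
    if c = '\'' ∨ c = '"' then
      match List.findIdx? (· = c) (s.drop (counter + 1)) with
      | none => none   -- Python: raise Exception (excluded by Pre_)
      | some jump =>
        let counter2 := counter + jump + 1
        if s.getD counter2 ' ' = '!' then some (String.mk (s.drop counter2))
        else goA s (counter2 + 1)
    else if c = '!' then some (String.mk (s.drop counter))
    else goA s (counter + 1)
  else none
  termination_by s.length - counter
  decreasing_by all_goals omega

def identify_comment (code_line : String) : Option String := goA code_line.toList 0

-- ===== PORT B =====
-- B's for loop: one pass, `quote` is the active opening quote (or none).
-- B raises the same exception as A when a quote is left open; the port returns `none`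
-- there (outside Pre_, never claimed).
def goB : List Char → Option Char → Option String
  | [], some _ => none   -- Python: raise Exception (excluded by Pre_)
  | [], none => none
  | ch :: rest, none =>
    if ch = '\'' ∨ ch = '"' then goB rest (some ch)
    else if ch = '!' then some (String.mk (ch :: rest))
    else goB rest none
  | ch :: rest, some q => if ch = q then goB rest none else goB rest (some q)

def identify_comment_alt (code_line : String) : Option String := goB code_line.toList none

-- ===== PRECONDITION & SPEC =====
-- Pre_ excludes exactly the lines on which Python A raises (an opening ' or " outside a
-- comment that is never closed); B raises the identical Exception there.
def preOk : List Char → Option Char → Bool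
  | [], q => q.isNone
  | ch :: rest, none =>
    if ch = '\'' ∨ ch = '"' then preOk rest (some ch)
    else if ch = '!' then true
    else preOk rest none
  | ch :: rest, some q => preOk rest (if ch = q then none else some q)

def Pre_identify_comment (code_line : String) : Prop := preOk code_line.toList none = true
instance (code_line : String) : Decidable (Pre_identify_comment code_line) := by
  unfold Pre_identify_comment; infer_instance

def pvWitness_identify_comment : String := "x = 'a!b' ! comment"

def Spec_identify_comment (code_line : String) (out : Option String) : Prop := out = identify_comment_alt code_line
instance (code_line : String) (out : Option String) : Decidable (Spec_identify_comment code_line out) := by unfold Spec_identify_comment; infer_instance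

-- ===== CLAIM (what is proved, stated in full; the proofs are below) =====
def Claim_equal_identify_comment : Prop := ∀ (code_line : String), Dom_identify_comment code_line → Pre_identify_comment code_line → Spec_identify_comment code_line (identify_comment code_line)

-- ===== LEMMAS AND PROOFS =====

-- goB from a `some q` state scans for the closing quote: exactly A's `find` jump.
theorem goB_some (q : Char) : ∀ (l : List Char), goB l (some q) =
    match List.findIdx? (· = q) l with
    | none => none
    | some j => goB (l.drop (j + 1)) none := by
  intro l
  induction l with
  | nil => simp [goB, List.findIdx?_nil]
  | cons ch rest ih =>
    rw [goB, List.findIdx?_cons]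
    by_cases hq : ch = q
    · simp [hq]
    · simp only [hq, decide_eq_true_eq, ih]
      cases hf : List.findIdx? (· = q) rest with
      | none => simp
      | some j => simp [List.drop_succ_cons]

-- both raise paths return none, so the ports agree on every string
theorem goA_eq_goB (n : Nat) : ∀ (s : List Char) (counter : Nat),
    s.length - counter = n → goA s counter = goB (s.drop counter) none := by
  induction n using Nat.strong_induction_on with
  | _ n ih =>
    intro s counter hn
    rw [goA]
    by_cases h : counter + 1 ≤ s.length
    · have hlt : counter < s.length := by omega
      rw [List.drop_eq_getElem_cons hlt]
      simp only [h, dif_pos]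
      generalize s[counter] = c
      by_cases hquote : c = '\'' ∨ c = '"'
      · rw [if_pos hquote, goB, if_pos hquote, goB_some]
        cases hf : List.findIdx? (· = c) (s.drop (counter + 1)) with
        | none => rfl
        | some jump =>
          obtain ⟨hjl, hpj, -⟩ := List.findIdx?_eq_some_iff_getElem.mp hf
          have hgc : (s.drop (counter + 1))[jump] = c := by
            simpa using hpj
          have hgd : s.getD (counter + jump + 1) ' ' = c := by
            have h1 : s[counter + 1 + jump]? = some c := by
              rw [← List.getElem?_drop, List.getElem?_eq_getElem hjl, hgc]
            rw [List.getD_eq_getElem?_getD,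
                show counter + jump + 1 = counter + 1 + jump by omega, h1]
            rfl
          simp only [hgd]
          rw [if_neg (by rcases hquote with h1 | h1 <;> simp [h1])]
          rw [ih (s.length - (counter + jump + 1 + 1)) (by simp only [List.length_drop] at hjl; omega) s
              (counter + jump + 1 + 1) rfl]
          rw [List.drop_drop,
              show counter + 1 + (jump + 1) = counter + jump + 1 + 1 from by omega]
      · rw [if_neg hquote]
        by_cases hbang : c = '!'
        · rw [if_pos hbang, goB, if_neg hquote, if_pos hbang]
        · rw [if_neg hbang, goB, if_neg hquote, if_neg hbang,
              ih (s.length - (counter + 1)) (by omega) s (counter + 1) rfl]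
    · rw [dif_neg h, List.drop_eq_nil_of_le (by omega), goB]

-- ===== VERDICT (by name: the statement is the Claim_ definition above) =====
theorem identify_comment_spec : Claim_equal_identify_comment := by
  intro s _ _
  unfold Spec_identify_comment identify_comment identify_comment_alt
  simpa using goA_eq_goB s.toList.length s.toList 0 rfl
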